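-- pv_equiv track=rewrite | github.com/jessicabat/market-foundry | src/utils/document_sectioning.py | section_press_release
-- ===== SOURCE A (Python) =====
-- def section_press_release(text: str) -> dict:
--     """Press release sections: headline, body, boilerplate."""
--     lines = [line.strip() for line in text.splitlines() if line.strip()]
--
--     sections = {"headline": [], "body": [], "boilerplate": []}
--     current = "body"
--
--     for i, line in enumerate(lines):
--         lower = line.lower()
--
--         # Headline: first few bold/all-caps lines
--         if i < 5 and (line.isupper() or "--" in line or len(line) < 100):
--             sections["headline"].append(line)
--         # Boilerplate: "About", "Forward-Looking", contacts
--         elif any(kw in lower for kw in ["about", "forward-looking", "contacts", "investor"]):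
--             current = "boilerplate"
--             sections[current].append(line)
--         else:
--             sections[current].append(line)
--
--     return {k: "\n".join(v) for k, v in sections.items()}
-- ===== SOURCE B (Python) =====
-- def section_press_release(text: str) -> dict:
--     """Press release sections: headline, body, boilerplate."""
--     lines = [line.strip() for line in text.splitlines() if line.strip()]
--
--     def is_head(i, line):
--         return i < 5 and (line.isupper() or "--" in line or len(line) < 100)
--
--     def is_kw(line):
--         low = line.lower()
--         return any(kw in low for kw in ("about", "forward-looking", "contacts", "investor"))
--
--     heads = [line for i, line in enumerate(lines) if is_head(i, line)]
--     rest = [line for i, line in enumerate(lines) if not is_head(i, line)]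
--
--     # boilerplate onset: first non-headline line containing a keyword
--     j = 0
--     while j < len(rest) and not is_kw(rest[j]):
--         j += 1
--
--     return {"headline": "\n".join(heads),
--             "body": "\n".join(rest[:j]),
--             "boilerplate": "\n".join(rest[j:])}
-- ===== Notes on version B (the rewrite author's own statement) =====
-- stated objective: alternative
-- what changed: Replaced A's single stateful loop carrying a one-way section flag by three passes: collect headline lines, collect the remaining lines, then find the boilerplate onset index with a while loop and slice the remainder into body/boilerplate.
import Mathlib
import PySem

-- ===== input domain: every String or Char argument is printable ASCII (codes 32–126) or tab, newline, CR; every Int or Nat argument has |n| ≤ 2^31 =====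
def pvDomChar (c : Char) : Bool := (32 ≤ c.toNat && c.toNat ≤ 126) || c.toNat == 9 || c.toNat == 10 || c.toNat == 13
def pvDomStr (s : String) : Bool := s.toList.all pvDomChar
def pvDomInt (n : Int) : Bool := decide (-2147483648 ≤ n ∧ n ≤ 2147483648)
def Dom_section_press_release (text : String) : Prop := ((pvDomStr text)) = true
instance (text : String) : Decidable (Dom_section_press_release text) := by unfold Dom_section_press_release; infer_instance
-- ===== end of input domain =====

-- B splits the work into three passes (collect headlines, collect the remaining lines,
-- find the boilerplate onset and slice) instead of A's single stateful per-line loop;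
-- objective: alternative decomposition, same O(n) cost.


-- shared helpers (both Pythons contain these very expressions)

-- Python str.isupper(): at least one cased character and no lowercase one (exact on ASCII;
-- hand-ported: PySem has only the per-character isupper/islower)
def pvIsUpperStr (s : String) : Bool :=
  (s.toList.any fun c => PySem.Chars.isupper c || PySem.Chars.islower c) &&
  (s.toList.all fun c => !PySem.Chars.islower c)

-- [line.strip() for line in text.splitlines() if line.strip()]
def pvLines (text : String) : List String :=
  ((PySem.Str.splitlines text).map PySem.Str.strip).filter (fun l => !(l == ""))

-- i < 5 and (line.isupper() or "--" in line or len(line) < 100)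
def pvIsHead (i : Int) (line : String) : Bool :=
  decide (i < 5) && (pvIsUpperStr line || PySem.Str.isIn "--" line ||
                     decide (PySem.Str.len line < 100))

-- any(kw in line.lower() for kw in ["about", "forward-looking", "contacts", "investor"])
def pvIsKw (line : String) : Bool :=
  (["about", "forward-looking", "contacts", "investor"]).any
    (fun kw => PySem.Str.isIn kw (PySem.Str.lower line))

-- ===== PORT A =====
-- the sections dict {"headline": h, "body": b, "boilerplate": bo} is represented by its
-- three entries (fixed literal keys), the section flag by the key string it holds
def pvStepA (st : List String × List String × List String × String) (p : Int × String) :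
    List String × List String × List String × String :=
  let (h, b, bo, cur) := st
  if pvIsHead p.1 p.2 then (h ++ [p.2], b, bo, cur)
  else if pvIsKw p.2 then (h, b, bo ++ [p.2], "boilerplate")
  else if cur == "boilerplate" then (h, b, bo ++ [p.2], cur)
  else (h, b ++ [p.2], bo, cur)

def section_press_release (text : String) : List (String × String) :=
  let lines := pvLines text
  let st := (PySem.List.enumerate lines 0).foldl pvStepA ([], [], [], "body")
  [("headline", PySem.Str.join "\n" st.1),
   ("body", PySem.Str.join "\n" st.2.1),
   ("boilerplate", PySem.Str.join "\n" st.2.2.1)]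

-- ===== PORT B =====
-- the while loop 'j = 0; while j < len(rest) and not is_kw(rest[j]): j += 1'
def pvFindKw : List String → Nat
  | [] => 0
  | l :: ls => if pvIsKw l then 0 else pvFindKw ls + 1

def section_press_release_alt (text : String) : List (String × String) :=
  let lines := pvLines text
  let heads := ((PySem.List.enumerate lines 0).filter (fun p => pvIsHead p.1 p.2)).map (·.2)
  let rest := ((PySem.List.enumerate lines 0).filter (fun p => !pvIsHead p.1 p.2)).map (·.2)
  let j := pvFindKw rest
  -- rest[:j] / rest[j:] with 0 ≤ j ≤ len(rest): exact as take/drop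
  -- (PySem.List.slice_to_natCast / slice_from_natCast)
  [("headline", PySem.Str.join "\n" heads),
   ("body", PySem.Str.join "\n" (rest.take j)),
   ("boilerplate", PySem.Str.join "\n" (rest.drop j))]

-- ===== PRECONDITION & SPEC =====
def Spec_section_press_release (text : String) (out : List (String × String)) : Prop := out = section_press_release_alt text
instance (text : String) (out : List (String × String)) : Decidable (Spec_section_press_release text out) := by unfold Spec_section_press_release; infer_instance

-- ===== CLAIM (what is proved, stated in full; the proofs are below) =====
def Claim_equal_section_press_release : Prop := ∀ (text : String), Dom_section_press_release text → Spec_section_press_release text (section_press_release text)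

-- ===== LEMMAS AND PROOFS =====

-- once the flag is "boilerplate", every non-headline line lands in boilerplate
theorem loopA_boiler (ls : List String) (s : Int) (h b bo : List String) :
    (PySem.List.enumerate ls s).foldl pvStepA (h, b, bo, "boilerplate") =
      (h ++ ((PySem.List.enumerate ls s).filter (fun p => pvIsHead p.1 p.2)).map (·.2),
       b,
       bo ++ ((PySem.List.enumerate ls s).filter (fun p => !pvIsHead p.1 p.2)).map (·.2),
       "boilerplate") := by
  induction ls generalizing s h b bo with
  | nil => simp [PySem.List.enumerate_nil]
  | cons l ls ih =>
      rw [PySem.List.enumerate_cons]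
      by_cases hh : pvIsHead s l = true
      · simp [pvStepA, hh, ih]
      · by_cases hk : pvIsKw l = true <;>
          simp [pvStepA, hh, hk, ih, List.append_assoc]

-- while the flag is still "body": headlines collected, the rest split at the first keyword line
theorem loopA_body (ls : List String) (s : Int) (h b bo : List String) :
    (PySem.List.enumerate ls s).foldl pvStepA (h, b, bo, "body") =
      (h ++ ((PySem.List.enumerate ls s).filter (fun p => pvIsHead p.1 p.2)).map (·.2),
       b ++ (((PySem.List.enumerate ls s).filter (fun p => !pvIsHead p.1 p.2)).map (·.2)).take
              (pvFindKw (((PySem.List.enumerate ls s).filter (fun p => !pvIsHead p.1 p.2)).map (·.2))),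
       bo ++ (((PySem.List.enumerate ls s).filter (fun p => !pvIsHead p.1 p.2)).map (·.2)).drop
              (pvFindKw (((PySem.List.enumerate ls s).filter (fun p => !pvIsHead p.1 p.2)).map (·.2))),
       if pvFindKw (((PySem.List.enumerate ls s).filter (fun p => !pvIsHead p.1 p.2)).map (·.2)) =
            (((PySem.List.enumerate ls s).filter (fun p => !pvIsHead p.1 p.2)).map (·.2)).length
       then "body" else "boilerplate") := by
  induction ls generalizing s h b bo with
  | nil => simp [PySem.List.enumerate_nil, pvFindKw]
  | cons l ls ih =>
      rw [PySem.List.enumerate_cons]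
      by_cases hh : pvIsHead s l = true
      · simp [pvStepA, hh, ih]
      · by_cases hk : pvIsKw l = true
        · have hb := loopA_boiler ls (s + 1) h b (bo ++ [l])
          simp [pvStepA, hh, hk, hb, pvFindKw, List.append_assoc]
        · simp [pvStepA, hh, hk, ih, pvFindKw, List.append_assoc]

-- ===== VERDICT (by name: the statement is the Claim_ definition above) =====
theorem section_press_release_spec : Claim_equal_section_press_release := by
  intro text _
  unfold Spec_section_press_release section_press_release section_press_release_alt
  simp only [loopA_body, List.nil_append]
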